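-- pv_equiv track=rewrite | github.com/massey101/aoc2023 | day12/solution.py | apply_combination_num
-- ===== SOURCE A (Python) =====
-- def apply_combination_num(data, combination):
--     new_data = []
--     i = 0
--     for s in data:
--         if s == '?':
--             new_data.append('.' if combination & (1 << i) else '#')
--             i += 1
--             continue
--         new_data.append(s)
--
--     return ''.join(new_data)
-- ===== SOURCE B (Python) =====
-- def apply_combination_num(data, combination):
--     parts = data.split('?')
--     out = [parts[0]]
--     for k, part in enumerate(parts[1:]):
--         out.append('.' if combination & (1 << k) else '#')
--         out.append(part)
--     return ''.join(out)
-- ===== Notes on version B (the rewrite author's own statement) =====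
-- stated objective: simpler
-- what changed: B splits the string on '?' once and rebuilds it by interleaving the literal segments with one bit-chosen character per gap, instead of A's per-character pass carrying a manual '?' counter.
import Mathlib
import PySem

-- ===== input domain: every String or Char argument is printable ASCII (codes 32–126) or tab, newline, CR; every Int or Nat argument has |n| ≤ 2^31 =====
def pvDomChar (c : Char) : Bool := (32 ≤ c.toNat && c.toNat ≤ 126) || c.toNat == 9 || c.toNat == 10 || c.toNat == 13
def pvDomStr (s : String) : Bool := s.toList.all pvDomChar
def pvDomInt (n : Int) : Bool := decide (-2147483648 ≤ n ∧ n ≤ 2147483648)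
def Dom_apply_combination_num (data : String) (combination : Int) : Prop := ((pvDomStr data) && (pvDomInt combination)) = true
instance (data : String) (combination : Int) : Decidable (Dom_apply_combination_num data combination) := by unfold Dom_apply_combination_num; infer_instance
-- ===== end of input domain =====

-- B replaces A's per-character pass with a '?'-counter by split('?') plus one loop over the gaps
-- between segments (objective: simpler decomposition; same asymptotic cost).

-- ===== PORT A =====
-- one fold over the characters carrying (new_data, i); ''.join of 1-char strings = String.ofList
def apply_combination_num (data : String) (combination : Int) : String :=
  let st := data.toList.foldl
    (fun (st : List Char × Nat) s =>
      if s = '?' then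
        (st.1 ++ [if PySem.Int.band combination ((1:Int) <<< st.2) ≠ 0 then '.' else '#'], st.2 + 1)
      else (st.1 ++ [s], st.2))
    ([], 0)
  String.ofList st.1

-- ===== PORT B =====
-- parts = data.split('?')  (split? is some for the non-empty separator "?"); parts[0] is safe
-- (split always yields at least one piece), ported as pyGetD parts 0 "".
def apply_combination_num_alt (data : String) (combination : Int) : String :=
  let parts := (PySem.Str.split? data "?").getD []
  let out := (PySem.List.enumerate (PySem.List.slice parts (some 1) none) 0).foldl
    (fun acc kp =>
      acc ++ [if PySem.Int.band combination ((1:Int) <<< kp.1.toNat) ≠ 0 then "." else "#", kp.2])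
    [PySem.List.pyGetD parts 0 ""]
  PySem.Str.join "" out

-- ===== PRECONDITION & SPEC =====
def Spec_apply_combination_num (data : String) (combination : Int) (out : String) : Prop := out = apply_combination_num_alt data combination
instance (data : String) (combination : Int) (out : String) : Decidable (Spec_apply_combination_num data combination out) := by unfold Spec_apply_combination_num; infer_instance

-- ===== CLAIM (what is proved, stated in full; the proofs are below) =====
def Claim_equal_apply_combination_num : Prop := ∀ (data : String) (combination : Int), Dom_apply_combination_num data combination → Spec_apply_combination_num data combination (apply_combination_num data combination)

-- ===== LEMMAS AND PROOFS =====

-- the character A writes for the k-th '?'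
def pvBitc (comb : Int) (i : Nat) : Char :=
  if PySem.Int.band comb ((1:Int) <<< i) ≠ 0 then '.' else '#'

-- A's pass, without the accumulator
def pvRep (comb : Int) : Nat → List Char → List Char
  | _, [] => []
  | i, c :: rest => if c = '?' then pvBitc comb i :: pvRep comb (i+1) rest
                    else c :: pvRep comb i rest

-- structural version of split on '?'
def pvQsplit : List Char → List (List Char)
  | [] => [[]]
  | c :: rest =>
      if c = '?' then [] :: pvQsplit rest
      else match pvQsplit rest with
        | [] => [[c]]
        | p :: ps => (c :: p) :: ps

def pvConsHead (x : List Char) : List (List Char) → List (List Char)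
  | [] => [x]
  | p :: ps => (x ++ p) :: ps

-- gluing the tail pieces back with bit characters
def pvGlueT (comb : Int) : Nat → List (List Char) → List Char
  | _, [] => []
  | i, p :: ps => pvBitc comb i :: (p ++ pvGlueT comb (i+1) ps)

def pvGlue (comb : Int) (i : Nat) : List (List Char) → List Char
  | [] => []
  | p :: ps => p ++ pvGlueT comb i ps

lemma pvQsplit_ne_nil (l : List Char) : pvQsplit l ≠ [] := by
  cases l with
  | nil => simp [pvQsplit]
  | cons c rest =>
    simp only [pvQsplit]
    split_ifs
    · simp
    · cases h : pvQsplit rest <;> simp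

lemma pvFoldA (comb : Int) : ∀ (l acc : List Char) (i : Nat),
    (l.foldl
      (fun (st : List Char × Nat) s =>
        if s = '?' then
          (st.1 ++ [if PySem.Int.band comb ((1:Int) <<< st.2) ≠ 0 then '.' else '#'], st.2 + 1)
        else (st.1 ++ [s], st.2))
      (acc, i)).1 = acc ++ pvRep comb i l := by
  intro l
  induction l with
  | nil => intro acc i; simp [pvRep]
  | cons c rest ih =>
    intro acc i
    by_cases h : c = '?'
    · subst h
      simp only [List.foldl_cons, reduceIte]
      rw [ih]
      simp [pvRep, pvBitc]
    · simp only [List.foldl_cons, if_neg h]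
      rw [ih]
      simp [pvRep, h]

lemma pvGo_eq : ∀ (fuel : Nat) (l cur : List Char) (acc : List (List Char)), l.length ≤ fuel →
    PySem.Chars.splitOn.go ['?'] fuel l cur acc
      = acc.reverse ++ pvConsHead cur.reverse (pvQsplit l) := by
  intro fuel
  induction fuel with
  | zero =>
    intro l cur acc h
    have : l = [] := by cases l <;> simp_all
    subst this
    rw [PySem.Chars.splitOn.go.eq_def]
    simp [pvQsplit, pvConsHead]
  | succ fuel ih =>
    intro l cur acc h
    cases l with
    | nil =>
      rw [PySem.Chars.splitOn.go.eq_def]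
      simp [pvQsplit, pvConsHead]
    | cons c rest =>
      by_cases hc : c = '?'
      · subst hc
        have hp : List.isPrefixOf ['?'] ('?' :: rest) = true := by
          simp [List.isPrefixOf]
        rw [PySem.Chars.splitOn.go.eq_def]
        simp only [hp, if_pos, List.length_cons, List.length_nil, List.drop_succ_cons, List.drop_zero]  -- reduce the match
        rw [ih rest [] (cur.reverse :: acc) (by simpa using Nat.le_of_succ_le_succ h)]
        simp [pvQsplit]
        cases hq : pvQsplit rest with
        | nil => exact absurd hq (pvQsplit_ne_nil rest)
        | cons p ps => simp [pvConsHead]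
      · have hp : List.isPrefixOf ['?'] (c :: rest) = false := by
          simp [List.isPrefixOf]; exact fun h' => absurd h'.symm hc
        rw [PySem.Chars.splitOn.go.eq_def]
        simp only [hp, Bool.false_eq_true, if_false]
        rw [ih rest (c :: cur) acc (by simpa using Nat.le_of_succ_le_succ h)]
        simp only [pvQsplit, if_neg hc]
        cases hq : pvQsplit rest with
        | nil => exact absurd hq (pvQsplit_ne_nil rest)
        | cons p ps => simp [pvConsHead]

lemma pvSplitOn_q (l : List Char) : PySem.Chars.splitOn l ['?'] = pvQsplit l := by
  rw [PySem.Chars.splitOn, pvGo_eq (l.length + 1) l [] [] (by omega)]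
  cases hq : pvQsplit l with
  | nil => exact absurd hq (pvQsplit_ne_nil l)
  | cons p ps => simp [pvConsHead]

lemma pvRep_eq_glue (comb : Int) : ∀ (l : List Char) (i : Nat),
    pvRep comb i l = pvGlue comb i (pvQsplit l) := by
  intro l
  induction l with
  | nil => intro i; simp [pvRep, pvQsplit, pvGlue, pvGlueT]
  | cons c rest ih =>
    intro i
    by_cases hc : c = '?'
    · subst hc
      simp only [pvRep, reduceIte, pvQsplit]
      cases hq : pvQsplit rest with
      | nil => exact absurd hq (pvQsplit_ne_nil rest)
      | cons p ps =>
        simp [pvGlue, pvGlueT, ih, hq]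
    · simp only [pvRep, if_neg hc, pvQsplit]
      cases hq : pvQsplit rest with
      | nil => exact absurd hq (pvQsplit_ne_nil rest)
      | cons p ps =>
        simp [pvGlue, ih, hq]

lemma pvIntercalate_nil (l : List (List Char)) : List.intercalate [] l = l.flatten := by
  induction l with
  | nil => simp [List.intercalate]
  | cons p ps ih => cases ps <;> simp_all [List.intercalate, List.intersperse]

lemma pvEnumGlue (comb : Int) : ∀ (qs : List String) (i : Nat),
    (((PySem.List.enumerate qs (i : Int)).flatMap
        (fun kp : Int × String =>
          [if PySem.Int.band comb ((1:Int) <<< kp.1.toNat) ≠ 0 then "." else "#", kp.2])).map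
      String.toList).flatten
    = pvGlueT comb i (qs.map String.toList) := by
  intro qs
  induction qs with
  | nil => intro i; simp [PySem.List.enumerate_nil, pvGlueT]
  | cons q rest ih =>
    intro i
    rw [PySem.List.enumerate_cons]
    have hcast : ((i : Int) + 1) = ((i + 1 : Nat) : Int) := by push_cast; ring
    rw [hcast]
    simp only [List.flatMap_cons, List.map_append, List.flatten_append, ih (i+1)]
    simp only [List.map_cons, List.map_nil, List.flatten_cons, List.flatten_nil, pvGlueT,
      pvBitc, Int.toNat_natCast]
    split_ifs <;> simp

theorem apply_combination_num_spec' (data : String) (combination : Int) :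
    apply_combination_num data combination = apply_combination_num_alt data combination := by
  rw [← String.toList_inj]
  -- A side
  have hA : (apply_combination_num data combination).toList = pvRep combination 0 data.toList := by
    simp only [apply_combination_num]
    rw [pvFoldA combination data.toList [] 0]
    simp
  -- B side
  have hsplit : PySem.Chars.split? data.toList ['?'] = some (pvQsplit data.toList) := by
    simp [PySem.Chars.split?, pvSplitOn_q]
  have hmap := PySem.Str.split?_map data "?"
  have hq : ("?" : String).toList = ['?'] := by decide
  rw [hq, hsplit] at hmap
  obtain ⟨parts, hparts, hmapl⟩ : ∃ parts, PySem.Str.split? data "?" = some parts ∧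
      parts.map String.toList = pvQsplit data.toList := by
    cases hsp : PySem.Str.split? data "?" with
    | none => rw [hsp] at hmap; simp at hmap
    | some parts => rw [hsp] at hmap; exact ⟨parts, rfl, by simpa using hmap⟩
  cases hps : parts with
  | nil =>
    rw [hps] at hmapl; simp at hmapl
    exact (pvQsplit_ne_nil _ hmapl).elim
  | cons q0 qtail =>
    rw [hps] at hmapl
    have hB : (apply_combination_num_alt data combination).toList
        = pvGlue combination 0 (pvQsplit data.toList) := by
      simp only [apply_combination_num_alt, hparts, Option.getD_some, hps]
      rw [PySem.Str.toList_join]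
      rw [PySem.List.slice_from (q0 :: qtail) (by norm_num)]
      simp only [Int.toNat_one, List.drop_succ_cons, List.drop_zero]
      rw [PySem.List.foldl_append_eq_flatMap]
      have h0 : PySem.List.pyGetD (q0 :: qtail) 0 "" = q0 := by
        simp [PySem.List.pyGetD, PySem.List.pyGet?, PySem.List.pyIdx?]
      rw [h0, PySem.Chars.join]
      have he : ("" : String).toList = [] := by decide
      rw [he, pvIntercalate_nil]
      simp only [List.map_append, List.map_cons, List.map_nil, List.flatten_append,
        List.flatten_cons, List.flatten_nil, List.append_nil]
      have := pvEnumGlue combination qtail 0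
      simp only [Nat.cast_zero] at this
      simp only [Int.shiftLeft_natCast_right] at this ⊢
      rw [this, ← hmapl]
      simp [pvGlue]
    rw [hA, hB, pvRep_eq_glue]

-- ===== VERDICT (by name: the statement is the Claim_ definition above) =====
theorem apply_combination_num_spec : Claim_equal_apply_combination_num := by
  intro data combination _
  exact apply_combination_num_spec' data combination
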